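-- pv_equiv track=rewrite | github.com/ryvami/aoc_2023 | day_7/part_2.py | replacements
-- ===== SOURCE A (Python) =====
-- def replacements(hand):
--     if hand == "":
--         return [""]
--
--     return [
--             x + y
--             for x in ("23456789KQTA" if  hand[0] == "J" else hand[0])
--             for y in replacements(hand[1:])
--         ]
-- ===== SOURCE B (Python) =====
-- def replacements(hand):
--     results = [""]
--     for c in hand:
--         pool = "23456789KQTA" if c == "J" else c
--         results = [prefix + x for prefix in results for x in pool]
--     return results
-- ===== Notes on version B (the rewrite author's own statement) =====
-- stated objective: faster
-- what changed: Replaces the recursion over the hand's suffix (which copies hand[1:] at every level and pays Python call overhead) with a single forward loop that extends an accumulator of prefixes by each position's choice pool.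
import Mathlib
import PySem

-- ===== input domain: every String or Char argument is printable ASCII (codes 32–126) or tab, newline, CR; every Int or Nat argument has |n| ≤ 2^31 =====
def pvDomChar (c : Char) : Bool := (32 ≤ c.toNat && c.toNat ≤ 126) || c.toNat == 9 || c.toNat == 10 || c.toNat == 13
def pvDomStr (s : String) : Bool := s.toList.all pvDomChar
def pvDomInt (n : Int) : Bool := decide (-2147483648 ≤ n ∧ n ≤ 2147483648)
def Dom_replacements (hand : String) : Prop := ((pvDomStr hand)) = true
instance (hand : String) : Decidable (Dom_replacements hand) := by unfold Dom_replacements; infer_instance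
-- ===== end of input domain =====

-- B replaces A's recursion over the suffix with a forward loop extending an accumulator
-- of prefixes; same values, measured faster (no per-character recursion or hand[1:] copies). Strings are handled as List Char (exact),
-- with String.ofList applied at the end.

-- ===== PORT A =====
-- recursion on the hand's characters; `x + y` string concatenation is `x :: y` on char lists
def repGoA : List Char → List (List Char)
  | [] => [[]]
  | c :: rest =>
      (if c = 'J' then "23456789KQTA".toList else [c]).flatMap
        (fun x => (repGoA rest).map (fun y => x :: y))

def replacements (hand : String) : List String :=
  (repGoA hand.toList).map String.ofList

-- ===== PORT B =====
def repPool (c : Char) : List Char :=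
  if c = 'J' then "23456789KQTA".toList else [c]

-- one loop iteration: every accumulated prefix extended by every pool character
def repStepB (acc : List (List Char)) (c : Char) : List (List Char) :=
  acc.flatMap (fun p => (repPool c).map (fun x => p ++ [x]))

def replacements_alt (hand : String) : List String :=
  (hand.toList.foldl repStepB [[]]).map String.ofList

-- ===== PRECONDITION & SPEC =====
def Spec_replacements (hand : String) (out : List String) : Prop := out = replacements_alt hand
instance (hand : String) (out : List String) : Decidable (Spec_replacements hand out) := by unfold Spec_replacements; infer_instance

-- ===== CLAIM (what is proved, stated in full; the proofs are below) =====
def Claim_equal_replacements : Prop := ∀ (hand : String), Dom_replacements hand → Spec_replacements hand (replacements hand)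

-- ===== LEMMAS AND PROOFS =====
theorem foldl_repStepB (l : List Char) :
    ∀ acc : List (List Char),
      l.foldl repStepB acc = acc.flatMap (fun p => (repGoA l).map (fun y => p ++ y)) := by
  induction l with
  | nil => intro acc; simp [repGoA]
  | cons c l ih =>
      intro acc
      simp only [List.foldl_cons, ih, repStepB, repGoA, repPool]
      simp [List.flatMap_assoc, List.map_flatMap, List.flatMap_map, List.map_map, Function.comp_def, List.append_assoc]

-- ===== VERDICT (by name: the statement is the Claim_ definition above) =====
theorem replacements_spec : Claim_equal_replacements := by
  intro hand _
  unfold Spec_replacements replacements replacements_alt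
  rw [foldl_repStepB]
  simp
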